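-- pv_equiv track=rewrite | github.com/Aniket9657/AST-Abstract-Syntax-Tree- | Project/python/ast/ast_explorer/modules/parser.py | get_node_color_category
-- ===== SOURCE A (Python) =====
-- def get_node_color_category(node_type: str) -> str:
--     """Map node types to color categories."""
--     categories = {
--         'statement': {'Module', 'FunctionDef', 'AsyncFunctionDef', 'ClassDef',
--                       'Return', 'Delete', 'Assign', 'AugAssign', 'AnnAssign',
--                       'Pass', 'Break', 'Continue', 'Global', 'Nonlocal',
--                       'Import', 'ImportFrom'},
--         'control': {'If', 'For', 'While', 'With', 'Try', 'ExceptHandler',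
--                     'Raise', 'Assert'},
--         'expression': {'BinOp', 'UnaryOp', 'BoolOp', 'Compare', 'Call',
--                        'IfExp', 'Attribute', 'Subscript', 'Starred',
--                        'Lambda', 'Await', 'Yield', 'YieldFrom'},
--         'comprehension': {'ListComp', 'SetComp', 'DictComp', 'GeneratorExp',
--                           'comprehension'},
--         'literal': {'Constant', 'List', 'Tuple', 'Set', 'Dict', 'JoinedStr'},
--         'name': {'Name', 'arg', 'alias'},
--         'operator': {'Add', 'Sub', 'Mult', 'Div', 'FloorDiv', 'Mod', 'Pow',
--                      'And', 'Or', 'Not', 'Eq', 'NotEq', 'Lt', 'LtE', 'Gt',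
--                      'GtE', 'Is', 'IsNot', 'In', 'NotIn'},
--     }
--     for cat, types in categories.items():
--         if node_type in types:
--             return cat
--     return 'other'
-- ===== SOURCE B (Python) =====
-- # One flat literal mapping (type -> category) read by a single .get; no loop, no grouping.
-- _COLOR_OF = {
--     'Module': 'statement',
--     'FunctionDef': 'statement',
--     'AsyncFunctionDef': 'statement',
--     'ClassDef': 'statement',
--     'Return': 'statement',
--     'Delete': 'statement',
--     'Assign': 'statement',
--     'AugAssign': 'statement',
--     'AnnAssign': 'statement',
--     'Pass': 'statement',
--     'Break': 'statement',
--     'Continue': 'statement',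
--     'Global': 'statement',
--     'Nonlocal': 'statement',
--     'Import': 'statement',
--     'ImportFrom': 'statement',
--     'If': 'control',
--     'For': 'control',
--     'While': 'control',
--     'With': 'control',
--     'Try': 'control',
--     'ExceptHandler': 'control',
--     'Raise': 'control',
--     'Assert': 'control',
--     'BinOp': 'expression',
--     'UnaryOp': 'expression',
--     'BoolOp': 'expression',
--     'Compare': 'expression',
--     'Call': 'expression',
--     'IfExp': 'expression',
--     'Attribute': 'expression',
--     'Subscript': 'expression',
--     'Starred': 'expression',
--     'Lambda': 'expression',
--     'Await': 'expression',
--     'Yield': 'expression',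
--     'YieldFrom': 'expression',
--     'ListComp': 'comprehension',
--     'SetComp': 'comprehension',
--     'DictComp': 'comprehension',
--     'GeneratorExp': 'comprehension',
--     'comprehension': 'comprehension',
--     'Constant': 'literal',
--     'List': 'literal',
--     'Tuple': 'literal',
--     'Set': 'literal',
--     'Dict': 'literal',
--     'JoinedStr': 'literal',
--     'Name': 'name',
--     'arg': 'name',
--     'alias': 'name',
--     'Add': 'operator',
--     'Sub': 'operator',
--     'Mult': 'operator',
--     'Div': 'operator',
--     'FloorDiv': 'operator',
--     'Mod': 'operator',
--     'Pow': 'operator',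
--     'And': 'operator',
--     'Or': 'operator',
--     'Not': 'operator',
--     'Eq': 'operator',
--     'NotEq': 'operator',
--     'Lt': 'operator',
--     'LtE': 'operator',
--     'Gt': 'operator',
--     'GtE': 'operator',
--     'Is': 'operator',
--     'IsNot': 'operator',
--     'In': 'operator',
--     'NotIn': 'operator',
-- }
--
--
-- def get_node_color_category(node_type: str) -> str:
--     """Map node types to color categories."""
--     return _COLOR_OF.get(node_type, 'other')
-- ===== Notes on version B (the rewrite author's own statement) =====
-- stated objective: idiomatic
-- what changed: Replaces the per-call loop over seven category sets with one flat literal dict mapping each node-type string directly to its category, read by a single .get with 'other' as default; the original sets are pairwise disjoint so first-match and dict semantics coincide.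
import Mathlib
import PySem

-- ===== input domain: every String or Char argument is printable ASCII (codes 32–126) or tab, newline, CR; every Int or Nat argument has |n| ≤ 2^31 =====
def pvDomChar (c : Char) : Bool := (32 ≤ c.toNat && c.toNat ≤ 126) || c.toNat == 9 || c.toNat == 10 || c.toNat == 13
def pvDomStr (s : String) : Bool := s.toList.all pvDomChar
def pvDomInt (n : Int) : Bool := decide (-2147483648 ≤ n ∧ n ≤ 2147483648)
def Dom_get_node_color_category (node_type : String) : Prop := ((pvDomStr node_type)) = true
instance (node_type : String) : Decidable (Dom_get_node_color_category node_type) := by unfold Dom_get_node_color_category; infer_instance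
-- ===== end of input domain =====

-- B replaces A's per-call loop over seven category sets with one flat literal
-- type -> category dict read by a single .get (objective: idiomatic).

-- ===== PORT A =====
-- the dict literal of A: category name -> set of node types (keys distinct, insertion order)
def pvCategoriesA : PySem.Dict String (PySem.Set String) := PySem.Dict.mk
  [ ("statement", PySem.Set.ofList ["Module", "FunctionDef", "AsyncFunctionDef", "ClassDef",
      "Return", "Delete", "Assign", "AugAssign", "AnnAssign",
      "Pass", "Break", "Continue", "Global", "Nonlocal",
      "Import", "ImportFrom"])
  , ("control", PySem.Set.ofList ["If", "For", "While", "With", "Try", "ExceptHandler",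
      "Raise", "Assert"])
  , ("expression", PySem.Set.ofList ["BinOp", "UnaryOp", "BoolOp", "Compare", "Call",
      "IfExp", "Attribute", "Subscript", "Starred",
      "Lambda", "Await", "Yield", "YieldFrom"])
  , ("comprehension", PySem.Set.ofList ["ListComp", "SetComp", "DictComp", "GeneratorExp",
      "comprehension"])
  , ("literal", PySem.Set.ofList ["Constant", "List", "Tuple", "Set", "Dict", "JoinedStr"])
  , ("name", PySem.Set.ofList ["Name", "arg", "alias"])
  , ("operator", PySem.Set.ofList ["Add", "Sub", "Mult", "Div", "FloorDiv", "Mod", "Pow",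
      "And", "Or", "Not", "Eq", "NotEq", "Lt", "LtE", "Gt",
      "GtE", "Is", "IsNot", "In", "NotIn"]) ]

-- 'for cat, types in categories.items(): if node_type in types: return cat' / 'return "other"'
def pvLoopA (items : List (String × PySem.Set String)) (node_type : String) : String :=
  match items with
  | [] => "other"
  | (cat, types) :: rest =>
      if PySem.Set.contains types node_type then cat else pvLoopA rest node_type

def get_node_color_category (node_type : String) : String :=
  pvLoopA pvCategoriesA.items node_type

-- ===== PORT B =====
-- _COLOR_OF: the flat literal dict of Source B, type -> category, in source order
def pvColorOf : PySem.Dict String String := PySem.Dict.ofList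
  [ ("Module", "statement")
  , ("FunctionDef", "statement")
  , ("AsyncFunctionDef", "statement")
  , ("ClassDef", "statement")
  , ("Return", "statement")
  , ("Delete", "statement")
  , ("Assign", "statement")
  , ("AugAssign", "statement")
  , ("AnnAssign", "statement")
  , ("Pass", "statement")
  , ("Break", "statement")
  , ("Continue", "statement")
  , ("Global", "statement")
  , ("Nonlocal", "statement")
  , ("Import", "statement")
  , ("ImportFrom", "statement")
  , ("If", "control")
  , ("For", "control")
  , ("While", "control")
  , ("With", "control")
  , ("Try", "control")
  , ("ExceptHandler", "control")
  , ("Raise", "control")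
  , ("Assert", "control")
  , ("BinOp", "expression")
  , ("UnaryOp", "expression")
  , ("BoolOp", "expression")
  , ("Compare", "expression")
  , ("Call", "expression")
  , ("IfExp", "expression")
  , ("Attribute", "expression")
  , ("Subscript", "expression")
  , ("Starred", "expression")
  , ("Lambda", "expression")
  , ("Await", "expression")
  , ("Yield", "expression")
  , ("YieldFrom", "expression")
  , ("ListComp", "comprehension")
  , ("SetComp", "comprehension")
  , ("DictComp", "comprehension")
  , ("GeneratorExp", "comprehension")
  , ("comprehension", "comprehension")
  , ("Constant", "literal")
  , ("List", "literal")
  , ("Tuple", "literal")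
  , ("Set", "literal")
  , ("Dict", "literal")
  , ("JoinedStr", "literal")
  , ("Name", "name")
  , ("arg", "name")
  , ("alias", "name")
  , ("Add", "operator")
  , ("Sub", "operator")
  , ("Mult", "operator")
  , ("Div", "operator")
  , ("FloorDiv", "operator")
  , ("Mod", "operator")
  , ("Pow", "operator")
  , ("And", "operator")
  , ("Or", "operator")
  , ("Not", "operator")
  , ("Eq", "operator")
  , ("NotEq", "operator")
  , ("Lt", "operator")
  , ("LtE", "operator")
  , ("Gt", "operator")
  , ("GtE", "operator")
  , ("Is", "operator")
  , ("IsNot", "operator")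
  , ("In", "operator")
  , ("NotIn", "operator") ]

def get_node_color_category_alt (node_type : String) : String :=
  PySem.Dict.getD pvColorOf node_type "other"

-- ===== PRECONDITION & SPEC =====
def Spec_get_node_color_category (node_type : String) (out : String) : Prop := out = get_node_color_category_alt node_type
instance (node_type : String) (out : String) : Decidable (Spec_get_node_color_category node_type out) := by unfold Spec_get_node_color_category; infer_instance

-- ===== CLAIM =====
def Claim_equal_get_node_color_category : Prop := ∀ (node_type : String), Dom_get_node_color_category node_type → Spec_get_node_color_category node_type (get_node_color_category node_type)

-- ===== LEMMAS AND PROOFS =====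

-- first-match lookup in an association list with default "other"
def pvLookup (l : List (String × String)) (n : String) : String :=
  match l with
  | [] => "other"
  | (k, v) :: rest => if k == n then v else pvLookup rest n

theorem pvLookup_map_append (ts : List String) (cat : String) (rest : List (String × String))
    (n : String) :
    pvLookup (ts.map (fun t => (t, cat)) ++ rest) n
      = if ts.contains n then cat else pvLookup rest n := by
  induction ts with
  | nil => simp
  | cons t ts ih =>
      simp only [List.map_cons, List.cons_append, pvLookup, ih, List.contains_cons, beq_iff_eq]
      by_cases h : t = n
      · subst h; simp
      · have h2 : ¬ n = t := fun e => h e.symm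
        simp [h, h2]

theorem pvLoopA_eq_lookup_flat (cats : List (String × PySem.Set String)) (n : String) :
    pvLoopA cats n = pvLookup (cats.flatMap (fun p => p.2.map (fun t => (t, p.1)))) n := by
  induction cats with
  | nil => rfl
  | cons p rest ih =>
      obtain ⟨cat, types⟩ := p
      simp only [pvLoopA, List.flatMap_cons, pvLookup_map_append, ih]
      simp [PySem.Set.contains]

theorem pvGetD_mk_eq_lookup (l : List (String × String)) (n : String) :
    PySem.Dict.getD (PySem.Dict.mk l) n "other" = pvLookup l n := by
  induction l with
  | nil => rfl
  | cons p rest ih =>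
      obtain ⟨k, v⟩ := p
      rw [PySem.Dict.getD_eq_get?_getD, PySem.Dict.get?_mk_cons]
      by_cases h : k == n <;>
        simp [pvLookup, h, ← PySem.Dict.getD_eq_get?_getD, ih]

-- on these concrete tables: B's literal flat dict (keys all distinct, so ofList keeps
-- the literal list) is exactly A's table flattened in loop order
set_option maxRecDepth 4000 in
theorem pvColorOf_eq_mk :
    pvColorOf = PySem.Dict.mk
      (pvCategoriesA.items.flatMap (fun p => p.2.map (fun t => (t, p.1)))) := by
  decide

-- ===== VERDICT =====
theorem get_node_color_category_spec : Claim_equal_get_node_color_category := by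
  intro node_type _
  unfold Spec_get_node_color_category get_node_color_category get_node_color_category_alt
  rw [pvLoopA_eq_lookup_flat, pvColorOf_eq_mk, pvGetD_mk_eq_lookup]
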